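-- pv_equiv track=rewrite | github.com/nextprocurement/NP-Company-Process | src/utils/utils.py | suggest_value
-- ===== SOURCE A (Python) =====
-- from collections import Counter
--
-- def suggest_value(elements):
--     """
--     Select elements based on appearance.
--     If same number of appearances, choose the longest.
--     If shorter elements are not included in the 'main' one, return all.
--     """
--     cnt = Counter(filter(None, elements))
--     cnt = cnt.most_common()
--     if cnt:
--         max_cnt = cnt[0][1]
--         els = sorted([k for k, v in cnt if v == max_cnt], key=lambda x: (-len(x), x))
--         # return els[0]
--         base = els.pop(0)
--         return [base]
--         # if all(
--         #     [all(t in base for t in regex.sub(r"\W", " ", el).split()) for el in els]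
--         # ):
--         #     return [base]
--         # return [base] + els
--     else:
--         # return None
--         return [None]
-- ===== SOURCE B (Python) =====
-- def suggest_value(elements):
--     """One counting pass over the list, then a single argmax scan over the
--     distinct elements; no most_common, no sorting."""
--     counts = {}
--     for e in elements:
--         if e:
--             counts[e] = counts.get(e, 0) + 1
--     best = None
--     best_count = 0
--     for e, c in counts.items():
--         if best is None or _better(c, e, best_count, best):
--             best, best_count = e, c
--     return [best]
--
--
-- def _better(c1, e1, c2, e2):
--     if c1 != c2:
--         return c1 > c2
--     if len(e1) != len(e2):
--         return len(e1) > len(e2)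
--     return e1 < e2
-- ===== Notes on version B (the rewrite author's own statement) =====
-- stated objective: simpler
-- what changed: A builds a Counter, sorts its items by count (most_common), filters the top-count keys and sorts them again by (-len, lex) to pop the first; B never sorts: one counting pass into a dict, then a single argmax scan over the distinct elements comparing (count, length, lexicographically-smallest) directly.
import Mathlib
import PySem

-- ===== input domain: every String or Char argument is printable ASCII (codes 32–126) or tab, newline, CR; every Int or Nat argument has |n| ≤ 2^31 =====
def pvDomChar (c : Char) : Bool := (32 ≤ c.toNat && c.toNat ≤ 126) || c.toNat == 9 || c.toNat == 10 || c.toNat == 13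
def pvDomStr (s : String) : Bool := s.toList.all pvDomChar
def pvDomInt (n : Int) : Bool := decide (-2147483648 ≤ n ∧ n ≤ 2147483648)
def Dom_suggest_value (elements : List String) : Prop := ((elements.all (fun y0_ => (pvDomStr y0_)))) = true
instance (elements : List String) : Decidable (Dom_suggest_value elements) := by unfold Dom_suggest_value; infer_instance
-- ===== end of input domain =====

-- B replaces A's Counter + most_common sort + second sort + pop with one counting pass and one
-- argmax scan comparing (count, length, lexicographic) directly; objective: simpler (no claim of speed).

-- ===== PORT A =====
def suggest_value (elements : List String) : List (Option String) :=
  -- cnt = Counter(filter(None, elements)); cnt = cnt.most_common()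
  match PySem.List.sorted (PySem.Dict.counter (elements.filter (fun e => decide (e ≠ "")))).items
          (fun kv => kv.2) true with
  | [] => [none]                                   -- 'else: return [None]'
  | (k0, max_cnt) :: rest =>
    -- els = sorted([k for k, v in cnt if v == max_cnt], key=lambda x: (-len(x), x)); base = els.pop(0)
    match PySem.List.sorted2 ((((k0, max_cnt) :: rest).filter (fun kv => decide (kv.2 = max_cnt))).map Prod.fst)
            (fun x => -(PySem.Str.len x)) (fun x => x) false with
    | [] => [none]                                 -- unreachable: els always contains cnt[0][0] (pop(0) cannot raise)
    | base :: _ => [some base]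

-- ===== PORT B =====
def svBetter (c1 : Int) (e1 : String) (c2 : Int) (e2 : String) : Bool :=
  if c1 ≠ c2 then c1 > c2
  else if PySem.Str.len e1 ≠ PySem.Str.len e2 then PySem.Str.len e1 > PySem.Str.len e2
  else e1 < e2

-- counting pass of Source B ('counts[e] = counts.get(e, 0) + 1' guarded by 'if e:')
def svCounts (elements : List String) : PySem.Dict String Int :=
  elements.foldl (fun d e => if e = "" then d else d.insert e (d.getD e 0 + 1)) PySem.Dict.empty

-- body of Source B's argmax loop (best, best_count carried together as an Option pair)
def svStep (best : Option (String × Int)) (kv : String × Int) : Option (String × Int) :=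
  match best with
  | none => some kv
  | some (b, bc) => if svBetter kv.2 kv.1 bc b then some kv else some (b, bc)

def suggest_value_alt (elements : List String) : List (Option String) :=
  [((svCounts elements).items.foldl svStep none).map (·.1)]

-- ===== PRECONDITION & SPEC =====
def Spec_suggest_value (elements : List String) (out : List (Option String)) : Prop := out = suggest_value_alt elements
instance (elements : List String) (out : List (Option String)) : Decidable (Spec_suggest_value elements out) := by unfold Spec_suggest_value; infer_instance

-- ===== CLAIM (what is proved, stated in full; the proofs are below) =====
def Claim_equal_suggest_value : Prop := ∀ (elements : List String), Dom_suggest_value elements → Spec_suggest_value elements (suggest_value elements)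

-- ===== LEMMAS AND PROOFS =====

-- The total strict order both programs optimise: count desc, then length desc, then lexicographic asc.
def svKey (elements : List String) (m : String) : Lex (Int × Lex (Int × String)) :=
  toLex (-(List.count m elements : Int), toLex (-(PySem.Str.len m), m))

def svBest (elements : List String) (m : String) : Prop :=
  m ∈ elements ∧ m ≠ "" ∧ ∀ y ∈ elements, y ≠ "" → y = m ∨ svKey elements m < svKey elements y

lemma svKey_lt_iff (elements : List String) (a b : String) :
    svKey elements a < svKey elements b ↔
      ((List.count b elements : Int) < (List.count a elements : Int) ∨
        ((List.count a elements : Int) = (List.count b elements : Int) ∧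
          (PySem.Str.len b < PySem.Str.len a ∨ (PySem.Str.len a = PySem.Str.len b ∧ a < b)))) := by
  simp only [svKey, Prod.Lex.lt_iff, ofLex_toLex]
  constructor <;> rintro (h | ⟨h1, h2 | ⟨h3, h4⟩⟩) <;> first
    | (left; omega)
    | (right; constructor; omega; first | (left; omega) | (right; exact ⟨by omega, by assumption⟩))

lemma svKey_lt_or_gt (elements : List String) {a b : String} (hne : a ≠ b) :
    svKey elements a < svKey elements b ∨ svKey elements b < svKey elements a := by
  refine lt_or_gt_of_ne (fun hk => hne ?_)
  have := congrArg (fun z => (ofLex (ofLex z).2).2) hk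
  simpa [svKey] using this

lemma svBest_unique {elements : List String} {m m' : String}
    (h : svBest elements m) (h' : svBest elements m') : m = m' := by
  by_contra hne
  rcases h with ⟨hm, hne0, hall⟩
  rcases h' with ⟨hm', hne0', hall'⟩
  rcases hall m' hm' hne0' with h1 | h1
  · exact hne h1.symm
  · rcases hall' m hm hne0 with h2 | h2
    · exact hne h2
    · exact absurd h2 (lt_asymm h1)

lemma svBetter_iff (c1 c2 : Int) (e1 e2 : String) :
    svBetter c1 e1 c2 e2 = true ↔
      toLex (-c1, toLex (-(PySem.Str.len e1), e1)) < toLex (-c2, toLex (-(PySem.Str.len e2), e2)) := by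
  simp only [Prod.Lex.lt_iff, ofLex_toLex]
  unfold svBetter
  split_ifs with h1 h2
  · simp only [decide_eq_true_eq, gt_iff_lt]
    constructor
    · intro h; left; omega
    · rintro (h | ⟨ha, _⟩) <;> omega
  · simp only [decide_eq_true_eq, gt_iff_lt]
    constructor
    · intro h; right; exact ⟨by omega, Or.inl (by omega)⟩
    · rintro (h | ⟨ha, hb | ⟨hc, _⟩⟩) <;> omega
  · simp only [decide_eq_true_eq]
    constructor
    · intro h; right; exact ⟨by omega, Or.inr ⟨by omega, h⟩⟩
    · rintro (h | ⟨ha, hb | ⟨_, hd⟩⟩)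
      · omega
      · omega
      · exact hd

lemma svBetter_key (elements : List String) (e1 e2 : String) :
    svBetter (List.count e1 elements : Int) e1 (List.count e2 elements : Int) e2 = true ↔
      svKey elements e1 < svKey elements e2 := by
  rw [svBetter_iff]; rfl

-- invariant: the running best is the optimum of the item pairs seen so far
def svQ (elements : List String) (s : List (String × Int)) : Option (String × Int) → Prop
  | none => s = []
  | some (b, c) => b ∈ elements ∧ b ≠ "" ∧ c = (List.count b elements : Int) ∧
      ∀ kv ∈ s, kv.1 = b ∨ svKey elements b < svKey elements kv.1

lemma svQ_step (elements : List String) (s : List (String × Int)) (acc : Option (String × Int))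
    (kv : String × Int)
    (hkv : kv.1 ∈ elements ∧ kv.1 ≠ "" ∧ kv.2 = (List.count kv.1 elements : Int))
    (h : svQ elements s acc) :
    svQ elements (s ++ [kv]) (svStep acc kv) := by
  obtain ⟨hk1, hk2, hk3⟩ := hkv
  cases acc with
  | none =>
    have hs : s = [] := h
    subst hs
    refine ⟨hk1, hk2, hk3, fun kv' hkv' => ?_⟩
    rw [List.nil_append, List.mem_singleton] at hkv'
    exact Or.inl (by rw [hkv'])
  | some p =>
    cases p with
    | mk b c =>
      obtain ⟨hb1, hb2, hb3, hb4⟩ := h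
      by_cases hsb : svBetter kv.2 kv.1 c b = true
      · have hstep : svStep (some (b, c)) kv = some kv := by
          unfold svStep; simp [hsb]
        rw [hstep]
        have hxb : svKey elements kv.1 < svKey elements b := by
          rw [← svBetter_key, ← hb3, ← hk3]; exact hsb
        refine ⟨hk1, hk2, hk3, fun kv' hkv' => ?_⟩
        rcases List.mem_append.1 hkv' with h' | h'
        · rcases hb4 kv' h' with h'' | h''
          · exact Or.inr (h'' ▸ hxb)
          · exact Or.inr (hxb.trans h'')
        · rw [List.mem_singleton] at h'; exact Or.inl (by rw [h'])
      · have hstep : svStep (some (b, c)) kv = some (b, c) := by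
          unfold svStep; simp [hsb]
        rw [hstep]
        refine ⟨hb1, hb2, hb3, fun kv' hkv' => ?_⟩
        rcases List.mem_append.1 hkv' with h' | h'
        · exact hb4 kv' h'
        · rw [List.mem_singleton] at h'
          subst h'
          by_cases hyb : kv'.1 = b
          · exact Or.inl hyb
          · rcases svKey_lt_or_gt elements hyb with hlt | hlt
            · exfalso; apply hsb; rw [hk3, hb3, svBetter_key]; exact hlt
            · exact Or.inr hlt

lemma svQ_fold (elements : List String) :
    ∀ (L : List (String × Int)) (s : List (String × Int)) (acc : Option (String × Int)),
      (∀ kv ∈ L, kv.1 ∈ elements ∧ kv.1 ≠ "" ∧ kv.2 = (List.count kv.1 elements : Int)) →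
      svQ elements s acc →
      svQ elements (s ++ L) (L.foldl svStep acc) := by
  intro L
  induction L with
  | nil => intro s acc _ h; simpa using h
  | cons kv L ih =>
    intro s acc hmem h
    have := ih (s ++ [kv]) (svStep acc kv)
      (fun y hy => hmem y (List.mem_cons_of_mem _ hy))
      (svQ_step elements s acc kv (hmem kv (List.mem_cons_self)) h)
    simpa using this

-- the guarded counting loop is Counter(filter(None, elements))
lemma foldl_guard {β : Type} (f : β → String → β) :
    ∀ (l : List String) (d : β),
      l.foldl (fun d e => if e = "" then d else f d e) d
        = (l.filter (fun e => decide (e ≠ ""))).foldl f d := by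
  intro l
  induction l with
  | nil => intro d; rfl
  | cons x xs ih => intro d; by_cases hx : x = "" <;> simp [hx, ih]

lemma svCounts_eq (elements : List String) :
    svCounts elements = PySem.Dict.counter (elements.filter (fun e => decide (e ≠ ""))) := by
  unfold svCounts
  rw [foldl_guard]
  exact PySem.Dict.foldl_insert_getD_add_one_eq_counter _

lemma sorted2_eq_sorted_lex {α κ₁ κ₂ : Type} [LinearOrder κ₁] [LinearOrder κ₂]
    (xs : List α) (k1 : α → κ₁) (k2 : α → κ₂) :
    PySem.List.sorted2 xs k1 k2 false
      = PySem.List.sorted xs (fun x => toLex (k1 x, k2 x)) false := by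
  have hb : (fun a b => decide (k1 a < k1 b) || (!decide (k1 b < k1 a) && decide (k2 a < k2 b)))
      = (fun (a b : α) => decide ((fun x => toLex (k1 x, k2 x)) a < (fun x => toLex (k1 x, k2 x)) b)) := by
    funext a b
    by_cases h1 : k1 a < k1 b
    · simp [h1, Prod.Lex.lt_iff]
    · by_cases h2 : k1 b < k1 a
      · simp [Prod.Lex.lt_iff, h1, h2, ne_of_gt h2]
      · have he : k1 a = k1 b := le_antisymm (not_lt.1 h2) (not_lt.1 h1)
        simp [Prod.Lex.lt_iff, he]
  have h2s : PySem.List.sorted2 xs k1 k2 false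
      = xs.foldl (fun acc x => PySem.List.insertBy
          (fun a b => decide (k1 a < k1 b) || (!decide (k1 b < k1 a) && decide (k2 a < k2 b))) x acc) [] := rfl
  rw [h2s, PySem.List.sorted_eq_foldl_insertBy, hb]

-- membership in Counter(l).items
lemma mem_items_iff (l : List String) (kv : String × Int) :
    kv ∈ (PySem.Dict.counter l).items ↔ kv.1 ∈ l ∧ kv.2 = (List.count kv.1 l : Int) := by
  rw [PySem.Dict.items_counter]
  constructor
  · intro h
    rcases List.mem_map.1 h with ⟨k, hk, hkv⟩
    subst hkv
    exact ⟨(PySem.Set.mem_ofList l k).1 hk, rfl⟩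
  · rintro ⟨h1, h2⟩
    refine List.mem_map.2 ⟨kv.1, (PySem.Set.mem_ofList l kv.1).2 h1, ?_⟩
    cases kv with
    | mk a b => simp only [Prod.mk.injEq, true_and]; exact h2.symm

lemma sv_eq (elements : List String) : suggest_value elements = suggest_value_alt elements := by
  have hitems : ∀ kv ∈ (svCounts elements).items,
      kv.1 ∈ elements ∧ kv.1 ≠ "" ∧ kv.2 = (List.count kv.1 elements : Int) := by
    intro kv hkv
    rw [svCounts_eq] at hkv
    rcases (mem_items_iff _ kv).1 hkv with ⟨h1, h2⟩
    rcases List.mem_filter.1 h1 with ⟨h1e, h1p⟩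
    have h1ne : kv.1 ≠ "" := by simpa using h1p
    exact ⟨h1e, h1ne, by rw [h2, List.count_filter (by simp [h1ne])]⟩
  have hQ := svQ_fold elements (svCounts elements).items [] none hitems rfl
  rw [List.nil_append] at hQ
  unfold suggest_value suggest_value_alt
  cases hr : (svCounts elements).items.foldl svStep none with
  | none =>
    rw [hr] at hQ
    have hfil : elements.filter (fun e => decide (e ≠ "")) = [] := by
      by_contra hne
      rcases List.exists_mem_of_ne_nil _ hne with ⟨a, ha⟩
      have hmem : (a, (List.count a (elements.filter (fun e => decide (e ≠ ""))) : Int))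
          ∈ (svCounts elements).items := by
        rw [svCounts_eq]; exact (mem_items_iff _ _).2 ⟨ha, rfl⟩
      rw [hQ] at hmem; cases hmem
    rw [hfil]
    rfl
  | some p =>
    cases p with
    | mk b c =>
      rw [hr] at hQ
      obtain ⟨hb1, hb2, hb3, hb4⟩ := hQ
      have hbestB : svBest elements b := by
        refine ⟨hb1, hb2, fun y hy hy0 => ?_⟩
        have hyF : y ∈ elements.filter (fun e => decide (e ≠ "")) :=
          List.mem_filter.2 ⟨hy, by simp [hy0]⟩
        have hyI : (y, (List.count y (elements.filter (fun e => decide (e ≠ ""))) : Int))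
            ∈ (svCounts elements).items := by
          rw [svCounts_eq]; exact (mem_items_iff _ _).2 ⟨hyF, rfl⟩
        exact hb4 _ hyI
      have hbF : b ∈ elements.filter (fun e => decide (e ≠ "")) :=
        List.mem_filter.2 ⟨hb1, by simp [hb2]⟩
      have hcnt : ∀ y : String, y ≠ "" →
          List.count y (elements.filter (fun e => decide (e ≠ ""))) = List.count y elements :=
        fun y hy => List.count_filter (by simp [hy])
      split
      · -- cnt.most_common() == [] although b was counted: impossible
        next heq =>
        exfalso
        have hbI : (b, (List.count b (elements.filter (fun e => decide (e ≠ ""))) : Int))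
            ∈ (PySem.Dict.counter (elements.filter (fun e => decide (e ≠ "")))).items :=
          (mem_items_iff _ _).2 ⟨hbF, rfl⟩
        rw [(PySem.List.sorted_eq_nil_iff _ _ _).1 heq] at hbI
        cases hbI
      · next k0 max_cnt rest heq =>
        have hmax : ∀ kv ∈ (PySem.Dict.counter (elements.filter (fun e => decide (e ≠ "")))).items,
            kv.2 ≤ max_cnt :=
          PySem.List.key_head_sorted_rev_ge _ _ heq
        have hhead_mem : (k0, max_cnt)
            ∈ (PySem.Dict.counter (elements.filter (fun e => decide (e ≠ "")))).items :=
          (PySem.List.mem_sorted _ _ _ _).1 (by rw [heq]; exact List.mem_cons_self)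
        have hcand : ∀ e, (e ∈ (((k0, max_cnt) :: rest).filter
              (fun kv => decide (kv.2 = max_cnt))).map Prod.fst)
            ↔ (e ∈ elements.filter (fun e => decide (e ≠ "")) ∧
               (List.count e (elements.filter (fun e => decide (e ≠ ""))) : Int) = max_cnt) := by
          intro e
          constructor
          · intro hmem
            rcases List.mem_map.1 hmem with ⟨kv, hkv, hfst⟩
            rcases List.mem_filter.1 hkv with ⟨hkvL, hp⟩
            have hkvI := (PySem.List.mem_sorted _ _ _ _).1 (heq ▸ hkvL)
            rcases (mem_items_iff _ kv).1 hkvI with ⟨h1, h2⟩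
            simp only [decide_eq_true_eq] at hp
            subst hfst
            exact ⟨h1, by rw [← h2]; exact hp⟩
          · rintro ⟨h1, h2⟩
            refine List.mem_map.2 ⟨(e, (List.count e (elements.filter (fun e => decide (e ≠ ""))) : Int)),
              List.mem_filter.2 ⟨?_, by simp only [decide_eq_true_eq]; exact h2⟩, rfl⟩
            have hI : (e, (List.count e (elements.filter (fun e => decide (e ≠ ""))) : Int))
                ∈ (PySem.Dict.counter (elements.filter (fun e => decide (e ≠ "")))).items :=
              (mem_items_iff _ _).2 ⟨h1, rfl⟩
            have := (PySem.List.mem_sorted _ (fun kv => kv.2) true _).2 hI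
            rw [heq] at this
            exact this
        rcases (mem_items_iff _ _).1 hhead_mem with ⟨hk0F, hk0c⟩
        rw [sorted2_eq_sorted_lex]
        split
        · next heq2 =>
          exfalso
          have hk0cand := (hcand k0).2 ⟨hk0F, hk0c.symm⟩
          rw [(PySem.List.sorted_eq_nil_iff _ _ _).1 heq2] at hk0cand
          cases hk0cand
        · next base tail heq2 =>
          have hm : base ∈ (((k0, max_cnt) :: rest).filter
              (fun kv => decide (kv.2 = max_cnt))).map Prod.fst :=
            (PySem.List.mem_sorted _ _ _ _).1 (by rw [heq2]; exact List.mem_cons_self)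
          have hmin := PySem.List.key_head_sorted_le _ (fun x => toLex (-(PySem.Str.len x), x)) heq2
          rcases (hcand base).1 hm with ⟨hbaseF, hbasec⟩
          rcases List.mem_filter.1 hbaseF with ⟨hbaseE, hbase0'⟩
          have hbase0 : base ≠ "" := by simpa using hbase0'
          have hbestA : svBest elements base := by
            refine ⟨hbaseE, hbase0, fun y hy hy0 => ?_⟩
            by_cases hyb : y = base
            · exact Or.inl hyb
            · right
              have hyF : y ∈ elements.filter (fun e => decide (e ≠ "")) :=
                List.mem_filter.2 ⟨hy, by simp [hy0]⟩
              have hyle : (List.count y (elements.filter (fun e => decide (e ≠ ""))) : Int) ≤ max_cnt :=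
                hmax (y, (List.count y (elements.filter (fun e => decide (e ≠ ""))) : Int)) ((mem_items_iff _ _).2 ⟨hyF, rfl⟩)
              rw [svKey_lt_iff]
              by_cases hyc : (List.count y (elements.filter (fun e => decide (e ≠ ""))) : Int) = max_cnt
              · -- same (maximal) count: compare (-len, lex) keys
                have hycand := (hcand y).2 ⟨hyF, hyc⟩
                have hle := hmin y hycand
                have hne : toLex (-(PySem.Str.len base), base) ≠ toLex (-(PySem.Str.len y), y) := by
                  intro hk
                  exact hyb (congrArg (fun z => (ofLex z).2) hk).symm
                have hlt := lt_of_le_of_ne hle hne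
                rw [Prod.Lex.lt_iff] at hlt
                simp only [ofLex_toLex] at hlt
                right
                constructor
                · rw [← hcnt base hbase0, ← hcnt y hy0, hbasec, hyc]
                · rcases hlt with h' | ⟨h'', h'⟩
                  · left; omega
                  · right; exact ⟨by omega, h'⟩
              · left
                rw [← hcnt base hbase0, ← hcnt y hy0, hbasec]
                omega
          rw [svBest_unique hbestA hbestB]
          rfl

-- ===== VERDICT (by name: the statement is the Claim_ definition above) =====
theorem suggest_value_spec : Claim_equal_suggest_value := by
  intro elements _
  unfold Spec_suggest_value
  exact sv_eq elements
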